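-- pv_equiv track=rewrite | github.com/AndrewShepherd/leetcode-python | edit-distance/edit_distance.py | divideBySubstrings
-- ===== SOURCE A (Python) =====
-- def divideBySubstrings(w1, w2):
--     matchedAlready = set()
--     for w1Index, w1C in enumerate(w1):
--         for w2Index, w2C in enumerate(w2):
--             if (w1C == w2C) and not (w1Index, w2Index) in matchedAlready:
--                 w1MatchEnd = w1Index
--                 w2MatchEnd = w2Index
--                 while(w1MatchEnd < len(w1) and w2MatchEnd < len(w2) and w1[w1MatchEnd] == w2[w2MatchEnd]):
--                     matchedAlready.add((w1MatchEnd, w2MatchEnd))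
--                     w1MatchEnd += 1
--                     w2MatchEnd += 1
--                 yield (w1[0:w1Index], w2[0:w2Index]), (w1[w1MatchEnd:], w2[w2MatchEnd:])
-- ===== SOURCE B (Python) =====
-- def divideBySubstrings(w1, w2):
--     n, m = len(w1), len(w2)
--     runs = []
--     for d in range(-(n - 1), m):          # each diagonal j - i == d, walked once
--         i = max(0, -d)
--         j = i + d
--         while i < n and j < m:
--             if w1[i] == w2[j]:
--                 si, sj = i, j
--                 while i < n and j < m and w1[i] == w2[j]:
--                     i += 1
--                     j += 1
--                 runs.append((si, sj, i, j))
--             else: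
--                 i += 1
--                 j += 1
--     buckets = {}                          # group runs by start row
--     for si, sj, ei, ej in runs:
--         buckets.setdefault(si, []).append((sj, ei, ej))
--     for row in range(n):                  # emit in row-major order of run starts
--         for sj, ei, ej in buckets.get(row, []):
--             yield (w1[:row], w2[:sj]), (w1[ei:], w2[ej:])
-- ===== Notes on version B (the rewrite author's own statement) =====
-- stated objective: alternative
-- what changed: B replaces A's row-major nested scan with a visited set by a per-diagonal sweep: each diagonal j-i=d of the grid is walked once, maximal match runs are collected with no start test and no membership structure, then grouped by start row in a dict of buckets and emitted in row order, reproducing A's yield sequence.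
import Mathlib
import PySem

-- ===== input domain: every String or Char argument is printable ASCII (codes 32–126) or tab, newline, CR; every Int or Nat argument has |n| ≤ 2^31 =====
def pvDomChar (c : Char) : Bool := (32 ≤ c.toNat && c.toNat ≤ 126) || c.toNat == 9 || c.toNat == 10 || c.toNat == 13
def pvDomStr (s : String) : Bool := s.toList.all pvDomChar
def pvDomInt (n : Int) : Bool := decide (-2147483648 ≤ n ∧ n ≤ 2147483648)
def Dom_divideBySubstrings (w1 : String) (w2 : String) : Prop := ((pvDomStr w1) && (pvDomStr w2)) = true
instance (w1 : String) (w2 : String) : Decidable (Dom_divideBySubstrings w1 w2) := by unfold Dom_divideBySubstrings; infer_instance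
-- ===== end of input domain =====

-- B replaces A's row-major scan with a visited set by a per-diagonal sweep: each diagonal
-- j-i=d is walked once collecting maximal match runs, which are then emitted grouped by
-- start row; same yield sequence (generators compared by their yielded List).
-- All loops are ported with an explicit fuel argument (always called with enough fuel for
-- the loop to hit its own exit condition first), a totality device only.

-- ===== PORT A =====
-- the inner while loop: advances (e1,e2) along the diagonal, recording cells in the set
def pvExtendA (cs1 cs2 : List Char) :
    Nat → Nat → Nat → PySem.Set (Nat × Nat) → Nat × Nat × PySem.Set (Nat × Nat)
  | 0, e1, e2, S => (e1, e2, S)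
  | fuel + 1, e1, e2, S =>
    if e1 < cs1.length ∧ e2 < cs2.length ∧ cs1[e1]? = cs2[e2]? then
      pvExtendA cs1 cs2 fuel (e1 + 1) (e2 + 1) (PySem.Set.add S (e1, e2))
    else (e1, e2, S)

-- inner `for w2Index, w2C in enumerate(w2)` loop, from index j on; c = w1[i];
-- returns (final set, yields of the rest of the row); slices are PySem.List.slice
def pvInnerA (cs1 cs2 : List Char) (i : Nat) (c : Char) :
    Nat → Nat → PySem.Set (Nat × Nat) →
      PySem.Set (Nat × Nat) × List ((String × String) × (String × String))
  | 0, _, S => (S, [])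
  | fuel + 1, j, S =>
    if j < cs2.length then
      if cs2[j]? = some c ∧ (i, j) ∉ S then
        let r := pvExtendA cs1 cs2 (cs1.length - i) i j S
        let rest := pvInnerA cs1 cs2 i c fuel (j + 1) r.2.2
        (rest.1,
          ((String.ofList (PySem.List.slice cs1 (some 0) (some (i : Int))),
            String.ofList (PySem.List.slice cs2 (some 0) (some (j : Int)))),
           (String.ofList (PySem.List.slice cs1 (some (r.1 : Int)) none),
            String.ofList (PySem.List.slice cs2 (some (r.2.1 : Int)) none))) :: rest.2)
      else pvInnerA cs1 cs2 i c fuel (j + 1) S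
    else (S, [])

-- outer `for w1Index, w1C in enumerate(w1)` loop, from row i on
def pvOuterA (cs1 cs2 : List Char) :
    Nat → Nat → PySem.Set (Nat × Nat) → List ((String × String) × (String × String))
  | 0, _, _ => []
  | fuel + 1, i, S =>
    if h : i < cs1.length then
      let r := pvInnerA cs1 cs2 i cs1[i] cs2.length 0 S
      r.2 ++ pvOuterA cs1 cs2 fuel (i + 1) r.1
    else []

def divideBySubstrings (w1 : String) (w2 : String) :
    List ((String × String) × (String × String)) :=
  pvOuterA w1.toList w2.toList w1.toList.length 0 PySem.Set.empty

-- ===== PORT B =====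
-- B's run-extension while loop (`while i < n and j < m and w1[i] == w2[j]`)
def pvExtendB (cs1 cs2 : List Char) : Nat → Nat → Nat → Nat × Nat
  | 0, e1, e2 => (e1, e2)
  | fuel + 1, e1, e2 =>
    if e1 < cs1.length ∧ e2 < cs2.length ∧ cs1[e1]? = cs2[e2]? then
      pvExtendB cs1 cs2 fuel (e1 + 1) (e2 + 1)
    else (e1, e2)

-- B's `while i < n and j < m:` walk along one diagonal, collecting runs (si,sj,ei,ej)
def pvDiagWalk (cs1 cs2 : List Char) : Nat → Nat → Nat → List (Nat × Nat × Nat × Nat)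
  | 0, _, _ => []
  | fuel + 1, i, j =>
    if i < cs1.length ∧ j < cs2.length then
      if cs1[i]? = cs2[j]? then
        (i, j, (pvExtendB cs1 cs2 (cs1.length - i) i j).1, (pvExtendB cs1 cs2 (cs1.length - i) i j).2) ::
          pvDiagWalk cs1 cs2 fuel (pvExtendB cs1 cs2 (cs1.length - i) i j).1
            (pvExtendB cs1 cs2 (cs1.length - i) i j).2
      else pvDiagWalk cs1 cs2 fuel (i + 1) (j + 1)
    else []

-- `for d in range(-(n - 1), m):` — all diagonals, each walked from its top cell
def pvRunsB (cs1 cs2 : List Char) : List (Nat × Nat × Nat × Nat) :=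
  (PySem.List.pyRange (-((cs1.length : Int) - 1)) (cs2.length : Int) 1).flatMap
    (fun d => pvDiagWalk cs1 cs2 cs1.length (max 0 (-d)).toNat ((max 0 (-d)) + d).toNat)

-- `buckets.setdefault(si, []).append((sj, ei, ej))` over all collected runs
def pvBuckets (cs1 cs2 : List Char) : PySem.Dict Int (List (Nat × Nat × Nat)) :=
  (pvRunsB cs1 cs2).foldl
    (fun d q => PySem.Dict.modify d (q.1 : Int) [] (fun l => l ++ [q.2])) PySem.Dict.empty

-- the yield expression `(w1[:row], w2[:sj]), (w1[ei:], w2[ej:])`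
def pvYieldRow (cs1 cs2 : List Char) (row : Int) (t : Nat × Nat × Nat) :
    (String × String) × (String × String) :=
  ((String.ofList (PySem.List.slice cs1 none (some row)),
    String.ofList (PySem.List.slice cs2 none (some (t.1 : Int)))),
   (String.ofList (PySem.List.slice cs1 (some (t.2.1 : Int)) none),
    String.ofList (PySem.List.slice cs2 (some (t.2.2 : Int)) none)))

-- `for row in range(n): for sj,ei,ej in buckets.get(row, []): yield …`
def divideBySubstrings_alt (w1 : String) (w2 : String) :
    List ((String × String) × (String × String)) :=
  let cs1 := w1.toList
  let cs2 := w2.toList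
  (PySem.List.pyRange 0 (cs1.length : Int) 1).flatMap (fun row =>
    (PySem.Dict.getD (pvBuckets cs1 cs2) row []).map (pvYieldRow cs1 cs2 row))

-- ===== PRECONDITION & SPEC =====
def Spec_divideBySubstrings (w1 : String) (w2 : String) (out : List ((String × String) × (String × String))) : Prop := out = divideBySubstrings_alt w1 w2
instance (w1 : String) (w2 : String) (out : List ((String × String) × (String × String))) : Decidable (Spec_divideBySubstrings w1 w2 out) := by unfold Spec_divideBySubstrings; infer_instance

-- ===== CLAIM (what is proved, stated in full; the proofs are below) =====
def Claim_equal_divideBySubstrings : Prop := ∀ (w1 : String) (w2 : String), Dom_divideBySubstrings w1 w2 → Spec_divideBySubstrings w1 w2 (divideBySubstrings w1 w2)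

-- ===== LEMMAS AND PROOFS =====

-- row-major run-start characterization: the middleman both ports are proved equal to
def pvInnerB (cs1 cs2 : List Char) (i : Nat) (c : Char) :
    Nat → Nat → List ((String × String) × (String × String))
  | 0, _ => []
  | fuel + 1, j =>
    if j < cs2.length then
      if cs2[j]? = some c ∧ (i = 0 ∨ j = 0 ∨ cs1[i - 1]? ≠ cs2[j - 1]?) then
        let r := pvExtendB cs1 cs2 (cs1.length - i) i j
        ((String.ofList (PySem.List.slice cs1 (some 0) (some (i : Int))),
          String.ofList (PySem.List.slice cs2 (some 0) (some (j : Int)))),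
         (String.ofList (PySem.List.slice cs1 (some (r.1 : Int)) none),
          String.ofList (PySem.List.slice cs2 (some (r.2 : Int)) none))) :: pvInnerB cs1 cs2 i c fuel (j + 1)
      else pvInnerB cs1 cs2 i c fuel (j + 1)
    else []

def pvOuterB (cs1 cs2 : List Char) :
    Nat → Nat → List ((String × String) × (String × String))
  | 0, _ => []
  | fuel + 1, i =>
    if h : i < cs1.length then
      pvInnerB cs1 cs2 i cs1[i] cs2.length 0 ++ pvOuterB cs1 cs2 fuel (i + 1)
    else []

-- start of the diagonal run through (a,b): walk back while predecessors match
def pvBack (cs1 cs2 : List Char) (a b : Nat) : Nat × Nat :=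
  if h : 0 < a ∧ 0 < b ∧ cs1[a - 1]? = cs2[b - 1]? then
    pvBack cs1 cs2 (a - 1) (b - 1)
  else (a, b)
termination_by a
decreasing_by omega

-- cells that A's matchedAlready contains just before the scan reaches cell (i,j)
def pvM (cs1 cs2 : List Char) (i j a b : Nat) : Prop :=
  a < cs1.length ∧ b < cs2.length ∧ cs1[a]? = cs2[b]? ∧
    ((pvBack cs1 cs2 a b).1 < i ∨ ((pvBack cs1 cs2 a b).1 = i ∧ (pvBack cs1 cs2 a b).2 < j))

theorem pvBack_le (cs1 cs2 : List Char) (a b : Nat) :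
    ∃ k, k ≤ a ∧ k ≤ b ∧ pvBack cs1 cs2 a b = (a - k, b - k) := by
  induction a, b using pvBack.induct cs1 cs2 with
  | case1 a b h ih =>
    obtain ⟨k, hk1, hk2, hk3⟩ := ih
    exact ⟨k + 1, by omega, by omega, by rw [pvBack, dif_pos h]; rw [hk3]; congr 1 <;> omega⟩
  | case2 a b h => exact ⟨0, by omega, by omega, by rw [pvBack, dif_neg h]; simp⟩

theorem pvBack_stop (cs1 cs2 : List Char) (a b : Nat) :
    ¬ (0 < (pvBack cs1 cs2 a b).1 ∧ 0 < (pvBack cs1 cs2 a b).2 ∧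
       cs1[(pvBack cs1 cs2 a b).1 - 1]? = cs2[(pvBack cs1 cs2 a b).2 - 1]?) := by
  induction a, b using pvBack.induct cs1 cs2 with
  | case1 a b h ih => rw [pvBack, dif_pos h]; exact ih
  | case2 a b h => rw [pvBack, dif_neg h]; exact h

theorem pvBack_succ (cs1 cs2 : List Char) (a b : Nat) (h : cs1[a]? = cs2[b]?) :
    pvBack cs1 cs2 (a + 1) (b + 1) = pvBack cs1 cs2 a b := by
  rw [pvBack]
  have : 0 < a + 1 ∧ 0 < b + 1 ∧ cs1[a + 1 - 1]? = cs2[b + 1 - 1]? := by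
    simpa using h
  rw [dif_pos this]
  simp

-- cells whose run start is (i,j) form exactly the diagonal of predecessor-matches
theorem pvBack_eq_iff (cs1 cs2 : List Char) (a b i j : Nat) :
    pvBack cs1 cs2 a b = (i, j) ↔
      (∃ k, a = i + k ∧ b = j + k ∧ (∀ t, t < k → cs1[i + t]? = cs2[j + t]?)) ∧
      ¬ (0 < i ∧ 0 < j ∧ cs1[i - 1]? = cs2[j - 1]?) := by
  constructor
  · intro h
    have hstop := pvBack_stop cs1 cs2 a b
    rw [h] at hstop
    refine ⟨?_, hstop⟩
    clear hstop
    induction a, b using pvBack.induct cs1 cs2 with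
    | case1 a b hcond ih =>
      rw [pvBack, dif_pos hcond] at h
      obtain ⟨k, hk1, hk2, hk3⟩ := ih h
      refine ⟨k + 1, by omega, by omega, ?_⟩
      intro t ht
      rcases Nat.lt_or_ge t k with h' | h'
      · exact hk3 t h'
      · have htk : t = k := by omega
        subst htk
        have h1 : i + t = a - 1 := by omega
        have h2 : j + t = b - 1 := by omega
        rw [h1, h2]
        exact hcond.2.2
    | case2 a b hcond =>
      rw [pvBack, dif_neg hcond] at h
      obtain ⟨rfl, rfl⟩ := Prod.mk.injEq .. |>.mp h
      exact ⟨0, by omega, by omega, fun t ht => absurd ht (by omega)⟩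
  · rintro ⟨⟨k, rfl, rfl, hm⟩, hstop⟩
    induction k with
    | zero => simp only [Nat.add_zero]; rw [pvBack, dif_neg hstop]
    | succ s ih =>
      have h1 : i + (s + 1) = (i + s) + 1 := by omega
      have h2 : j + (s + 1) = (j + s) + 1 := by omega
      rw [h1, h2, pvBack_succ cs1 cs2 _ _ (hm s (by omega))]
      exact ih (fun t ht => hm t (by omega))

theorem pvExtendB_spec (cs1 cs2 : List Char) (fuel : Nat) :
    ∀ e1 e2 : Nat, cs1.length ≤ e1 + fuel →
    ∃ L, pvExtendB cs1 cs2 fuel e1 e2 = (e1 + L, e2 + L) ∧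
      (∀ t, t < L → e1 + t < cs1.length ∧ e2 + t < cs2.length ∧ cs1[e1 + t]? = cs2[e2 + t]?) ∧
      ¬ (e1 + L < cs1.length ∧ e2 + L < cs2.length ∧ cs1[e1 + L]? = cs2[e2 + L]?) := by
  induction fuel with
  | zero =>
    intro e1 e2 hf
    exact ⟨0, by rw [pvExtendB]; simp, fun t ht => absurd ht (by omega), by
      rintro ⟨h1, -, -⟩; omega⟩
  | succ fuel ih =>
    intro e1 e2 hf
    by_cases h : e1 < cs1.length ∧ e2 < cs2.length ∧ cs1[e1]? = cs2[e2]?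
    · obtain ⟨L, hEq, hRun, hStop⟩ := ih (e1 + 1) (e2 + 1) (by omega)
      refine ⟨L + 1, ?_, ?_, ?_⟩
      · rw [pvExtendB, if_pos h, hEq]
        congr 1 <;> omega
      · intro t ht
        match t with
        | 0 => simpa using h
        | s + 1 =>
          have h1 : e1 + (s + 1) = e1 + 1 + s := by omega
          have h2 : e2 + (s + 1) = e2 + 1 + s := by omega
          rw [h1, h2]
          exact hRun s (by omega)
      · have h1 : e1 + (L + 1) = e1 + 1 + L := by omega
        have h2 : e2 + (L + 1) = e2 + 1 + L := by omega
        rw [h1, h2]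
        exact hStop
    · exact ⟨0, by rw [pvExtendB, if_neg h]; simp, fun t ht => absurd ht (by omega), by simpa using h⟩

theorem pvExtendB_le (cs1 cs2 : List Char) (fuel : Nat) :
    ∀ e1 e2 : Nat, e1 ≤ (pvExtendB cs1 cs2 fuel e1 e2).1 := by
  induction fuel with
  | zero => intro e1 e2; rw [pvExtendB]
  | succ fuel ih =>
    intro e1 e2
    rw [pvExtendB]
    split
    · exact Nat.le_trans (by omega) (ih (e1 + 1) (e2 + 1))
    · exact Nat.le_refl e1

theorem pvExtendA_spec (cs1 cs2 : List Char) (fuel : Nat) :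
    ∀ (e1 e2 : Nat) (S : PySem.Set (Nat × Nat)),
    (pvExtendA cs1 cs2 fuel e1 e2 S).1 = (pvExtendB cs1 cs2 fuel e1 e2).1 ∧
    (pvExtendA cs1 cs2 fuel e1 e2 S).2.1 = (pvExtendB cs1 cs2 fuel e1 e2).2 ∧
    (∀ p : Nat × Nat, p ∈ (pvExtendA cs1 cs2 fuel e1 e2 S).2.2 ↔
       p ∈ S ∨ ∃ t, e1 + t < (pvExtendB cs1 cs2 fuel e1 e2).1 ∧ p = (e1 + t, e2 + t)) := by
  induction fuel with
  | zero =>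
    intro e1 e2 S
    rw [pvExtendA, pvExtendB]
    exact ⟨rfl, rfl, fun p => by simp⟩
  | succ fuel ih =>
    intro e1 e2 S
    by_cases h : e1 < cs1.length ∧ e2 < cs2.length ∧ cs1[e1]? = cs2[e2]?
    · rw [pvExtendA, if_pos h, pvExtendB, if_pos h]
      obtain ⟨ih1, ih2, ih3⟩ := ih (e1 + 1) (e2 + 1) (PySem.Set.add S (e1, e2))
      have hge := pvExtendB_le cs1 cs2 fuel (e1 + 1) (e2 + 1)
      refine ⟨ih1, ih2, ?_⟩
      intro p
      rw [ih3 p]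
      rw [PySem.Set.mem_add]
      constructor
      · rintro ((hp | rfl) | ⟨t, ht, rfl⟩)
        · exact Or.inl hp
        · exact Or.inr ⟨0, by omega, by simp⟩
        · refine Or.inr ⟨t + 1, by omega, ?_⟩
          congr 1 <;> omega
      · rintro (hp | ⟨t, ht, rfl⟩)
        · exact Or.inl (Or.inl hp)
        · match t with
          | 0 => exact Or.inl (Or.inr (by simp))
          | s + 1 =>
            refine Or.inr ⟨s, by omega, ?_⟩
            congr 1 <;> omega
    · rw [pvExtendA, if_neg h, pvExtendB, if_neg h]
      refine ⟨rfl, rfl, fun p => ?_⟩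
      simp

theorem pvM_succ_j (cs1 cs2 : List Char) (i j a b : Nat) :
    pvM cs1 cs2 i (j + 1) a b ↔ pvM cs1 cs2 i j a b ∨
      (a < cs1.length ∧ b < cs2.length ∧ cs1[a]? = cs2[b]? ∧ pvBack cs1 cs2 a b = (i, j)) := by
  unfold pvM
  constructor
  · rintro ⟨h1, h2, h3, h4⟩
    rcases h4 with h | ⟨he, hl⟩
    · exact Or.inl ⟨h1, h2, h3, Or.inl h⟩
    · rcases Nat.lt_or_ge (pvBack cs1 cs2 a b).2 j with hj | hj
      · exact Or.inl ⟨h1, h2, h3, Or.inr ⟨he, hj⟩⟩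
      · have hj' : (pvBack cs1 cs2 a b).2 = j := by omega
        exact Or.inr ⟨h1, h2, h3, Prod.ext_iff.mpr ⟨he, hj'⟩⟩
  · rintro (⟨h1, h2, h3, h4⟩ | ⟨h1, h2, h3, h4⟩)
    · exact ⟨h1, h2, h3, by omega⟩
    · obtain ⟨he1, he2⟩ := Prod.ext_iff.mp h4
      exact ⟨h1, h2, h3, by omega⟩

theorem pvM_start_match (cs1 cs2 : List Char) (i j a b : Nat)
    (h : pvBack cs1 cs2 a b = (i, j)) (hm : cs1[a]? = cs2[b]?) : cs1[i]? = cs2[j]? := by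
  obtain ⟨⟨k, rfl, rfl, hrun⟩, -⟩ := (pvBack_eq_iff cs1 cs2 _ _ i j).mp h
  match k with
  | 0 => simpa using hm
  | s + 1 => simpa using hrun 0 (by omega)

theorem pvM_row_end (cs1 cs2 : List Char) (i j a b : Nat) (hj : cs2.length ≤ j) :
    pvM cs1 cs2 i j a b ↔ pvM cs1 cs2 (i + 1) 0 a b := by
  obtain ⟨k, hk1, hk2, heq⟩ := pvBack_le cs1 cs2 a b
  unfold pvM
  rw [heq]
  constructor <;> rintro ⟨h1, h2, h3, h4⟩ <;> exact ⟨h1, h2, h3, by simp at h4 ⊢; omega⟩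

theorem pvInner_eq (cs1 cs2 : List Char) (i : Nat) (c : Char) (fuel : Nat) :
    ∀ (j : Nat) (S : PySem.Set (Nat × Nat)), i < cs1.length → cs1[i]? = some c →
    cs2.length ≤ j + fuel →
    (∀ a b, (a, b) ∈ S ↔ pvM cs1 cs2 i j a b) →
    (pvInnerA cs1 cs2 i c fuel j S).2 = pvInnerB cs1 cs2 i c fuel j ∧
    (∀ a b, (a, b) ∈ (pvInnerA cs1 cs2 i c fuel j S).1 ↔ pvM cs1 cs2 (i + 1) 0 a b) := by
  induction fuel with
  | zero =>
    intro j S hi hc hf hS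
    rw [pvInnerA, pvInnerB]
    exact ⟨rfl, fun a b => by rw [hS a b, pvM_row_end cs1 cs2 i j a b (by omega)]⟩
  | succ fuel ih =>
    intro j S hi hc hf hS
    by_cases hj : j < cs2.length
    · rw [pvInnerA, if_pos hj, pvInnerB, if_pos hj]
      by_cases hcd : cs2[j]? = some c
      · by_cases hst : i = 0 ∨ j = 0 ∨ cs1[i - 1]? ≠ cs2[j - 1]?
        · -- run start: both sides yield
          have hnotstop : ¬ (0 < i ∧ 0 < j ∧ cs1[i - 1]? = cs2[j - 1]?) := by
            rintro ⟨x, y, z⟩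
            rcases hst with h | h | h
            · omega
            · omega
            · exact h z
          have hback : pvBack cs1 cs2 i j = (i, j) := by rw [pvBack, dif_neg hnotstop]
          have hnotinS : (i, j) ∉ S := by
            rw [hS]
            rintro ⟨h1, h2, h3, h4⟩
            rw [hback] at h4
            simp at h4
          rw [if_pos (⟨hcd, hnotinS⟩ : cs2[j]? = some c ∧ (i, j) ∉ S),
          if_pos (⟨hcd, hst⟩ : cs2[j]? = some c ∧ (i = 0 ∨ j = 0 ∨ cs1[i - 1]? ≠ cs2[j - 1]?))]
          obtain ⟨hA1, hA2, hA3⟩ := pvExtendA_spec cs1 cs2 (cs1.length - i) i j S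
          obtain ⟨L, hBL, hRun, hStop⟩ := pvExtendB_spec cs1 cs2 (cs1.length - i) i j (by omega)
          have hS' : ∀ a b, (a, b) ∈ (pvExtendA cs1 cs2 (cs1.length - i) i j S).2.2 ↔
              pvM cs1 cs2 i (j + 1) a b := by
            intro a b
            rw [hA3, hS, pvM_succ_j]
            refine or_congr_right ?_
            constructor
            · rintro ⟨t, ht, heq⟩
              obtain ⟨rfl, rfl⟩ := Prod.mk.injEq .. |>.mp heq
              rw [hBL] at ht
              have htL : t < L := by omega
              obtain ⟨hr1, hr2, hr3⟩ := hRun t htL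
              refine ⟨hr1, hr2, hr3, (pvBack_eq_iff cs1 cs2 _ _ i j).mpr
                ⟨⟨t, rfl, rfl, fun s hs => (hRun s (by omega)).2.2⟩, hnotstop⟩⟩
            · rintro ⟨h1, h2, h3, h4⟩
              obtain ⟨⟨k, rfl, rfl, hk⟩, -⟩ := (pvBack_eq_iff cs1 cs2 _ _ i j).mp h4
              have hkL : k < L := by
                by_contra hge
                apply hStop
                refine ⟨by omega, by omega, ?_⟩
                rcases Nat.lt_or_ge L k with h' | h'
                · exact hk L h'
                · have : L = k := by omega
                  rw [this]
                  exact h3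
              exact ⟨k, by rw [hBL]; omega, rfl⟩
          obtain ⟨ihl, ihr⟩ := ih (j + 1) _ hi hc (by omega) hS'
          refine ⟨?_, ihr⟩
          simp only [ihl, hA1, hA2]
        · -- interior cell: A finds it in the set, B's start test fails
          have hi0 : ¬ i = 0 := fun h => hst (Or.inl h)
          have hj0 : ¬ j = 0 := fun h => hst (Or.inr (Or.inl h))
          have hpred : cs1[i - 1]? = cs2[j - 1]? := by
            by_contra h
            exact hst (Or.inr (Or.inr h))
          have hstop : 0 < i ∧ 0 < j ∧ cs1[i - 1]? = cs2[j - 1]? := ⟨by omega, by omega, hpred⟩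
          have hinS : (i, j) ∈ S := by
            rw [hS]
            refine ⟨hi, hj, by rw [hc, hcd], ?_⟩
            obtain ⟨k, hk1, hk2, heq⟩ := pvBack_le cs1 cs2 (i - 1) (j - 1)
            have hstep : pvBack cs1 cs2 i j = pvBack cs1 cs2 (i - 1) (j - 1) := by
              rw [pvBack, dif_pos hstop]
            rw [hstep, heq]
            left
            simp
            omega
          rw [if_neg (fun hcon => hcon.2 hinS),
            if_neg (fun hcon => by
              rcases hcon.2 with h | h | h
              · omega
              · omega
              · exact h hpred)]
          refine ih (j + 1) S hi hc (by omega) (fun a b => ?_)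
          rw [hS, pvM_succ_j]
          constructor
          · exact Or.inl
          · rintro (h | ⟨h1, h2, h3, h4⟩)
            · exact h
            · exact absurd hstop ((pvBack_eq_iff cs1 cs2 a b i j).mp h4).2
      · -- character mismatch: both sides skip
        rw [if_neg (fun hcon => hcd hcon.1), if_neg (fun hcon => hcd hcon.1)]
        refine ih (j + 1) S hi hc (by omega) (fun a b => ?_)
        rw [hS, pvM_succ_j]
        constructor
        · exact Or.inl
        · rintro (h | ⟨h1, h2, h3, h4⟩)
          · exact h
          · exact absurd ((pvM_start_match cs1 cs2 i j a b h4 h3).symm.trans hc) hcd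
    · rw [pvInnerA, if_neg hj, pvInnerB, if_neg hj]
      exact ⟨rfl, fun a b => by rw [hS a b, pvM_row_end cs1 cs2 i j a b (by omega)]⟩

theorem pvOuter_eq (cs1 cs2 : List Char) (fuel : Nat) :
    ∀ (i : Nat) (S : PySem.Set (Nat × Nat)),
    (∀ a b, (a, b) ∈ S ↔ pvM cs1 cs2 i 0 a b) →
    pvOuterA cs1 cs2 fuel i S = pvOuterB cs1 cs2 fuel i := by
  induction fuel with
  | zero => intro i S hS; rw [pvOuterA, pvOuterB]
  | succ fuel ih =>
    intro i S hS
    by_cases hi : i < cs1.length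
    · rw [pvOuterA, dif_pos hi, pvOuterB, dif_pos hi]
      obtain ⟨h1, h2⟩ := pvInner_eq cs1 cs2 i cs1[i] cs2.length 0 S hi
        (List.getElem?_eq_getElem hi) (by omega) hS
      simp only [h1, ih (i + 1) _ h2]
    · rw [pvOuterA, dif_neg hi, pvOuterB, dif_neg hi]

-- ===== B-side lemmas: the diagonal sweep collects exactly the run starts =====

-- (a,b) begins a maximal diagonal match run
def pvStart (cs1 cs2 : List Char) (a b : Nat) : Prop :=
  a < cs1.length ∧ b < cs2.length ∧ cs1[a]? = cs2[b]? ∧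
    (a = 0 ∨ b = 0 ∨ cs1[a - 1]? ≠ cs2[b - 1]?)

def pvQuadOf (cs1 cs2 : List Char) (a b : Nat) : Nat × Nat × Nat × Nat :=
  (a, b, (pvExtendB cs1 cs2 (cs1.length - a) a b).1, (pvExtendB cs1 cs2 (cs1.length - a) a b).2)

-- run starts in row i, at column ≥ j, in column order (quad form of pvInnerB)
def pvRowQuads (cs1 cs2 : List Char) (i : Nat) : Nat → Nat → List (Nat × Nat × Nat × Nat)
  | 0, _ => []
  | fuel + 1, j =>
    if j < cs2.length then
      if cs2[j]? = cs1[i]? ∧ (i = 0 ∨ j = 0 ∨ cs1[i - 1]? ≠ cs2[j - 1]?) then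
        pvQuadOf cs1 cs2 i j :: pvRowQuads cs1 cs2 i fuel (j + 1)
      else pvRowQuads cs1 cs2 i fuel (j + 1)
    else []

theorem mem_diagWalk (cs1 cs2 : List Char) (fuel : Nat) :
    ∀ i j : Nat, cs1.length ≤ i + fuel →
    (cs1[i]? = cs2[j]? ∧ i < cs1.length ∧ j < cs2.length →
      (i = 0 ∨ j = 0 ∨ cs1[i - 1]? ≠ cs2[j - 1]?)) →
    ∀ q, (q ∈ pvDiagWalk cs1 cs2 fuel i j ↔
      ∃ k, pvStart cs1 cs2 (i + k) (j + k) ∧ q = pvQuadOf cs1 cs2 (i + k) (j + k)) := by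
  induction fuel with
  | zero =>
    intro i j hf hP q
    rw [pvDiagWalk]
    simp only [List.not_mem_nil, false_iff]
    rintro ⟨k, ⟨h1, h2, -, -⟩, -⟩
    omega
  | succ fuel ih =>
    intro i j hf hP q
    by_cases h : i < cs1.length ∧ j < cs2.length
    · by_cases hm : cs1[i]? = cs2[j]?
      · obtain ⟨L, hBL, hRun, hStop⟩ := pvExtendB_spec cs1 cs2 (cs1.length - i) i j (by omega)
        have hL1 : 1 ≤ L := by
          by_contra hc
          have hL0 : L = 0 := by omega
          apply hStop
          subst hL0
          simpa using ⟨h.1, h.2, hm⟩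
        have hB1 : (pvExtendB cs1 cs2 (cs1.length - i) i j).1 = i + L := by rw [hBL]
        have hB2 : (pvExtendB cs1 cs2 (cs1.length - i) i j).2 = j + L := by rw [hBL]
        have hP' : cs1[(pvExtendB cs1 cs2 (cs1.length - i) i j).1]? =
            cs2[(pvExtendB cs1 cs2 (cs1.length - i) i j).2]? ∧
            (pvExtendB cs1 cs2 (cs1.length - i) i j).1 < cs1.length ∧
            (pvExtendB cs1 cs2 (cs1.length - i) i j).2 < cs2.length →
            ((pvExtendB cs1 cs2 (cs1.length - i) i j).1 = 0 ∨
             (pvExtendB cs1 cs2 (cs1.length - i) i j).2 = 0 ∨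
             cs1[(pvExtendB cs1 cs2 (cs1.length - i) i j).1 - 1]? ≠
               cs2[(pvExtendB cs1 cs2 (cs1.length - i) i j).2 - 1]?) := by
          rw [hBL]
          rintro ⟨hmm, hb1, hb2⟩
          exact absurd ⟨hb1, hb2, hmm⟩ hStop
        have ihq := ih (pvExtendB cs1 cs2 (cs1.length - i) i j).1
          (pvExtendB cs1 cs2 (cs1.length - i) i j).2 (by omega) hP'
        rw [pvDiagWalk, if_pos h, if_pos hm]
        simp only [List.mem_cons]
        constructor
        · rintro (rfl | hq)
          · exact ⟨0, ⟨by simpa using h.1, by simpa using h.2, by simpa using hm,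
              hP ⟨hm, h.1, h.2⟩⟩, by simp [pvQuadOf]⟩
          · obtain ⟨k, hs, rfl⟩ := (ihq _).mp hq
            have e1 : i + (L + k) = (pvExtendB cs1 cs2 (cs1.length - i) i j).1 + k := by omega
            have e2 : j + (L + k) = (pvExtendB cs1 cs2 (cs1.length - i) i j).2 + k := by omega
            exact ⟨L + k, by rw [e1, e2]; exact hs, by rw [e1, e2]⟩
        · rintro ⟨k, hs, rfl⟩
          rcases Nat.eq_zero_or_pos k with rfl | hk0
          · left; simp [pvQuadOf]
          · rcases Nat.lt_or_ge k L with hkL | hkL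
            · -- interior of the first run: not a start
              exfalso
              obtain ⟨-, -, -, hdisj⟩ := hs
              rcases hdisj with h0 | h0 | h0
              · omega
              · omega
              · apply h0
                have e1 : i + k - 1 = i + (k - 1) := by omega
                have e2 : j + k - 1 = j + (k - 1) := by omega
                rw [e1, e2]
                exact (hRun (k - 1) (by omega)).2.2
            · right
              apply (ihq _).mpr
              have e1 : (pvExtendB cs1 cs2 (cs1.length - i) i j).1 + (k - L) = i + k := by omega
              have e2 : (pvExtendB cs1 cs2 (cs1.length - i) i j).2 + (k - L) = j + k := by omega
              exact ⟨k - L, by rw [e1, e2]; exact hs, by rw [e1, e2]⟩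
      · have hP' : cs1[i + 1]? = cs2[j + 1]? ∧ i + 1 < cs1.length ∧ j + 1 < cs2.length →
            (i + 1 = 0 ∨ j + 1 = 0 ∨ cs1[i + 1 - 1]? ≠ cs2[j + 1 - 1]?) := by
          intro _
          right; right
          simpa using hm
        rw [pvDiagWalk, if_pos h, if_neg hm]
        rw [ih (i + 1) (j + 1) (by omega) hP' q]
        constructor
        · rintro ⟨k, hs, rfl⟩
          have e1 : i + (k + 1) = i + 1 + k := by omega
          have e2 : j + (k + 1) = j + 1 + k := by omega
          exact ⟨k + 1, by rw [e1, e2]; exact hs, by rw [e1, e2]⟩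
        · rintro ⟨k, hs, rfl⟩
          rcases Nat.eq_zero_or_pos k with rfl | hk0
          · exact absurd hs.2.2.1 (by simpa using hm)
          · have e1 : i + 1 + (k - 1) = i + k := by omega
            have e2 : j + 1 + (k - 1) = j + k := by omega
            exact ⟨k - 1, by rw [e1, e2]; exact hs, by rw [e1, e2]⟩
    · rw [pvDiagWalk, if_neg h]
      simp only [List.not_mem_nil, false_iff]
      rintro ⟨k, ⟨h1, h2, -, -⟩, -⟩
      exact h ⟨by omega, by omega⟩

theorem diagWalk_fst (cs1 cs2 : List Char) (fuel : Nat) :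
    ∀ i j : Nat, ∀ q ∈ pvDiagWalk cs1 cs2 fuel i j, i ≤ q.1 ∧ q.1 + j = q.2.1 + i := by
  induction fuel with
  | zero =>
    intro i j q hq
    rw [pvDiagWalk] at hq
    exact absurd hq (List.not_mem_nil)
  | succ fuel ih =>
    intro i j q hq
    rw [pvDiagWalk] at hq
    by_cases h : i < cs1.length ∧ j < cs2.length
    · rw [if_pos h] at hq
      by_cases hm : cs1[i]? = cs2[j]?
      · rw [if_pos hm] at hq
        obtain ⟨L, hBL, -, -⟩ := pvExtendB_spec cs1 cs2 (cs1.length - i) i j (by omega)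
        have hB1 : (pvExtendB cs1 cs2 (cs1.length - i) i j).1 = i + L := by rw [hBL]
        have hB2 : (pvExtendB cs1 cs2 (cs1.length - i) i j).2 = j + L := by rw [hBL]
        rcases List.mem_cons.mp hq with rfl | hq'
        · refine ⟨by simp, ?_⟩
          simp
          omega
        · obtain ⟨ih1, ih2⟩ := ih _ _ q hq'
          constructor <;> omega
      · rw [if_neg hm] at hq
        obtain ⟨ih1, ih2⟩ := ih _ _ q hq
        constructor <;> omega
    · rw [if_neg h] at hq
      exact absurd hq (List.not_mem_nil)

theorem diagWalk_pairwise (cs1 cs2 : List Char) (fuel : Nat) :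
    ∀ i j : Nat, (pvDiagWalk cs1 cs2 fuel i j).Pairwise (fun q q' => q.1 < q'.1) := by
  induction fuel with
  | zero => intro i j; rw [pvDiagWalk]; exact List.Pairwise.nil
  | succ fuel ih =>
    intro i j
    rw [pvDiagWalk]
    by_cases h : i < cs1.length ∧ j < cs2.length
    · rw [if_pos h]
      by_cases hm : cs1[i]? = cs2[j]?
      · rw [if_pos hm]
        obtain ⟨L, hBL, hRun, hStop⟩ := pvExtendB_spec cs1 cs2 (cs1.length - i) i j (by omega)
        have hL1 : 1 ≤ L := by
          by_contra hc
          have hL0 : L = 0 := by omega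
          apply hStop
          subst hL0
          simpa using ⟨h.1, h.2, hm⟩
        have hB1 : (pvExtendB cs1 cs2 (cs1.length - i) i j).1 = i + L := by rw [hBL]
        refine List.Pairwise.cons ?_ (ih _ _)
        intro q hq
        have := (diagWalk_fst cs1 cs2 fuel _ _ q hq).1
        simp only
        omega
      · rw [if_neg hm]
        exact ih _ _
    · rw [if_neg h]
      exact List.Pairwise.nil

theorem mem_runsB (cs1 cs2 : List Char) (q : Nat × Nat × Nat × Nat) :
    q ∈ pvRunsB cs1 cs2 ↔ ∃ a b, pvStart cs1 cs2 a b ∧ q = pvQuadOf cs1 cs2 a b := by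
  unfold pvRunsB
  rw [List.mem_flatMap]
  constructor
  · rintro ⟨d, hd, hq⟩
    have htop : (max 0 (-d)).toNat = 0 ∨ ((max 0 (-d)) + d).toNat = 0 := by omega
    have hP : cs1[(max 0 (-d)).toNat]? = cs2[((max 0 (-d)) + d).toNat]? ∧
        (max 0 (-d)).toNat < cs1.length ∧ ((max 0 (-d)) + d).toNat < cs2.length →
        ((max 0 (-d)).toNat = 0 ∨ ((max 0 (-d)) + d).toNat = 0 ∨
         cs1[(max 0 (-d)).toNat - 1]? ≠ cs2[((max 0 (-d)) + d).toNat - 1]?) := by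
      intro _
      rcases htop with h | h
      · exact Or.inl h
      · exact Or.inr (Or.inl h)
    obtain ⟨k, hs, rfl⟩ := (mem_diagWalk cs1 cs2 cs1.length _ _ (by omega) hP q).mp hq
    exact ⟨_, _, hs, rfl⟩
  · rintro ⟨a, b, hs, rfl⟩
    refine ⟨(b : Int) - (a : Int), ?_, ?_⟩
    · rw [PySem.List.mem_pyRange_one]
      obtain ⟨ha, hb, -, -⟩ := hs
      constructor <;> omega
    · have hi0 : (max 0 (-((b : Int) - (a : Int)))).toNat = a - b := by omega
      have hj0 : ((max 0 (-((b : Int) - (a : Int)))) + ((b : Int) - (a : Int))).toNat = b - a := by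
        omega
      rw [hi0, hj0]
      have hP : cs1[a - b]? = cs2[b - a]? ∧ a - b < cs1.length ∧ b - a < cs2.length →
          (a - b = 0 ∨ b - a = 0 ∨ cs1[a - b - 1]? ≠ cs2[b - a - 1]?) := by
        intro _
        omega
      apply (mem_diagWalk cs1 cs2 cs1.length _ _ (by omega) hP _).mpr
      have e1 : a - b + min a b = a := by omega
      have e2 : b - a + min a b = b := by omega
      exact ⟨min a b, by rw [e1, e2]; exact hs, by rw [e1, e2]⟩

-- column offset of every collected run equals its diagonal
theorem runsB_pairwise (cs1 cs2 : List Char) :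
    (pvRunsB cs1 cs2).Pairwise (fun q q' => q.1 = q'.1 → q.2.1 < q'.2.1) := by
  unfold pvRunsB
  rw [List.pairwise_flatMap]
  constructor
  · intro d hd
    apply (diagWalk_pairwise cs1 cs2 cs1.length _ _).imp_of_mem
    intro q q' _ _ hlt heq
    omega
  · have hrange := PySem.List.pairwise_lt_pyRange_one (-((cs1.length : Int) - 1)) (cs2.length : Int)
    apply hrange.imp_of_mem
    intro d d' _ _ hdd q hq q' hq'
    have h1 := diagWalk_fst cs1 cs2 cs1.length _ _ q hq
    have h2 := diagWalk_fst cs1 cs2 cs1.length _ _ q' hq'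
    intro heq
    -- q.2.1 - q.1 = d and q'.2.1 - q'.1 = d' (as integers), d < d'
    omega

-- proof-side view of one emitted element, with its start row still attached
def pvYieldB (cs1 cs2 : List Char) (q : Nat × Nat × Nat × Nat) :
    (String × String) × (String × String) :=
  ((String.ofList (PySem.List.slice cs1 none (some (q.1 : Int))),
    String.ofList (PySem.List.slice cs2 none (some (q.2.1 : Int)))),
   (String.ofList (PySem.List.slice cs1 (some (q.2.2.1 : Int)) none),
    String.ofList (PySem.List.slice cs2 (some (q.2.2.2 : Int)) none)))

-- the bucket of a row is the sub-list of runs starting on that row, in collection order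
theorem bucket_eq (cs1 cs2 : List Char) (row : Int) :
    PySem.Dict.getD (pvBuckets cs1 cs2) row [] =
      ((pvRunsB cs1 cs2).filter (fun q => (q.1 : Int) == row)).map (fun q => q.2) := by
  unfold pvBuckets
  have h1 : (pvRunsB cs1 cs2).foldl
      (fun d q => PySem.Dict.modify d (q.1 : Int) [] (fun l => l ++ [q.2])) PySem.Dict.empty
      = ((pvRunsB cs1 cs2).map (fun q => ((q.1 : Int), q.2))).foldl
        (fun d p => PySem.Dict.modify d p.1 [] (fun l => l ++ [p.2])) PySem.Dict.empty := by
    rw [List.foldl_map]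
  rw [h1, PySem.Dict.getD_foldl_modify_append, List.filter_map, List.map_map]
  simp [Function.comp_def]

-- two strictly key-increasing lists with the same members are equal
theorem eq_of_pairwise_lt_key {α : Type} (key : α → Nat) :
    ∀ (l1 l2 : List α), l1.Pairwise (fun x y => key x < key y) →
      l2.Pairwise (fun x y => key x < key y) → (∀ x, x ∈ l1 ↔ x ∈ l2) → l1 = l2 := by
  intro l1
  induction l1 with
  | nil =>
    intro l2 _ _ hm
    exact (List.eq_nil_iff_forall_not_mem.mpr
      (fun x hx => absurd ((hm x).mpr hx) (List.not_mem_nil))).symm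
  | cons a t ihp =>
    intro l2 h1 h2 hm
    have ha2 : a ∈ l2 := (hm a).mp (List.mem_cons_self)
    cases l2 with
    | nil => exact absurd ha2 (List.not_mem_nil)
    | cons b t2 =>
      have hb1 : b ∈ a :: t := (hm b).mpr (List.mem_cons_self)
      have hab : a = b := by
        by_contra hne
        have hat2 : a ∈ t2 := by
          rcases List.mem_cons.mp ha2 with h | h
          · exact absurd h hne
          · exact h
        have hbt : b ∈ t := by
          rcases List.mem_cons.mp hb1 with h | h
          · exact absurd h.symm hne
          · exact h
        have hba : key b < key a := List.rel_of_pairwise_cons h2 hat2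
        have hab' : key a < key b := List.rel_of_pairwise_cons h1 hbt
        omega
      subst hab
      congr 1
      apply ihp t2 h1.of_cons h2.of_cons
      intro x
      constructor
      · intro hx
        have hax : key a < key x := List.rel_of_pairwise_cons h1 hx
        rcases List.mem_cons.mp ((hm x).mp (List.mem_cons_of_mem a hx)) with h | h
        · subst h; omega
        · exact h
      · intro hx
        have hax : key a < key x := List.rel_of_pairwise_cons h2 hx
        rcases List.mem_cons.mp ((hm x).mpr (List.mem_cons_of_mem a hx)) with h | h
        · subst h; omega
        · exact h

theorem mem_rowQuads (cs1 cs2 : List Char) (i : Nat) (hi : i < cs1.length) (fuel : Nat) :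
    ∀ (j : Nat) (q : Nat × Nat × Nat × Nat), cs2.length ≤ j + fuel →
    (q ∈ pvRowQuads cs1 cs2 i fuel j ↔
      ∃ b, j ≤ b ∧ pvStart cs1 cs2 i b ∧ q = pvQuadOf cs1 cs2 i b) := by
  induction fuel with
  | zero =>
    intro j q hf
    rw [pvRowQuads]
    simp only [List.not_mem_nil, false_iff]
    rintro ⟨b, hb, ⟨-, hbm, -, -⟩, -⟩
    omega
  | succ fuel ih =>
    intro j q hf
    by_cases hj : j < cs2.length
    · rw [pvRowQuads, if_pos hj]
      by_cases hc : cs2[j]? = cs1[i]? ∧ (i = 0 ∨ j = 0 ∨ cs1[i - 1]? ≠ cs2[j - 1]?)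
      · rw [if_pos hc]
        simp only [List.mem_cons]
        constructor
        · rintro (rfl | hq)
          · exact ⟨j, le_refl j, ⟨hi, hj, hc.1.symm, hc.2⟩, rfl⟩
          · obtain ⟨b, hb, hs, rfl⟩ := (ih (j + 1) _ (by omega)).mp hq
            exact ⟨b, by omega, hs, rfl⟩
        · rintro ⟨b, hb, hs, rfl⟩
          rcases Nat.eq_or_lt_of_le hb with rfl | hb'
          · exact Or.inl rfl
          · exact Or.inr ((ih (j + 1) _ (by omega)).mpr ⟨b, by omega, hs, rfl⟩)
      · rw [if_neg hc]
        rw [ih (j + 1) _ (by omega)]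
        constructor
        · rintro ⟨b, hb, hs, rfl⟩
          exact ⟨b, by omega, hs, rfl⟩
        · rintro ⟨b, hb, hs, rfl⟩
          refine ⟨b, ?_, hs, rfl⟩
          rcases Nat.eq_or_lt_of_le hb with rfl | hb'
          · exact absurd ⟨hs.2.2.1.symm, hs.2.2.2⟩ hc
          · omega
    · rw [pvRowQuads, if_neg hj]
      simp only [List.not_mem_nil, false_iff]
      rintro ⟨b, hb, ⟨-, hbm, -, -⟩, -⟩
      omega

theorem rowQuads_pairwise (cs1 cs2 : List Char) (i : Nat) (hi : i < cs1.length) (fuel : Nat) :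
    ∀ j : Nat, cs2.length ≤ j + fuel →
    (pvRowQuads cs1 cs2 i fuel j).Pairwise (fun q q' => q.2.1 < q'.2.1) := by
  induction fuel with
  | zero => intro j hf; rw [pvRowQuads]; exact List.Pairwise.nil
  | succ fuel ih =>
    intro j hf
    by_cases hj : j < cs2.length
    · rw [pvRowQuads, if_pos hj]
      by_cases hc : cs2[j]? = cs1[i]? ∧ (i = 0 ∨ j = 0 ∨ cs1[i - 1]? ≠ cs2[j - 1]?)
      · rw [if_pos hc]
        refine List.Pairwise.cons ?_ (ih (j + 1) (by omega))
        intro q hq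
        obtain ⟨b, hb, -, rfl⟩ := (mem_rowQuads cs1 cs2 i hi fuel (j + 1) q (by omega)).mp hq
        show j < (pvQuadOf cs1 cs2 i b).2.1
        simp only [pvQuadOf]
        omega
      · rw [if_neg hc]
        exact ih (j + 1) (by omega)
    · rw [pvRowQuads, if_neg hj]
      exact List.Pairwise.nil

theorem filter_eq_rowQuads (cs1 cs2 : List Char) (i : Nat) (hi : i < cs1.length) :
    (pvRunsB cs1 cs2).filter (fun q => (q.1 : Int) == (i : Int)) =
      pvRowQuads cs1 cs2 i cs2.length 0 := by
  apply eq_of_pairwise_lt_key (fun q => q.2.1)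
  · -- filtered runs are strictly increasing in start column
    have hp := (runsB_pairwise cs1 cs2).filter (fun q => (q.1 : Int) == (i : Int))
    apply hp.imp_of_mem
    intro q q' hq hq' himp
    have h1 : q.1 = i := by
      have := (List.mem_filter.mp hq).2
      simp at this
      omega
    have h2 : q'.1 = i := by
      have := (List.mem_filter.mp hq').2
      simp at this
      omega
    exact himp (by omega)
  · exact rowQuads_pairwise cs1 cs2 i hi cs2.length 0 (by omega)
  · intro q
    rw [List.mem_filter, mem_runsB, mem_rowQuads cs1 cs2 i hi cs2.length 0 q (by omega)]
    constructor
    · rintro ⟨⟨a, b, hs, rfl⟩, hfil⟩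
      have ha : a = i := by
        simp [pvQuadOf] at hfil
        omega
      subst ha
      exact ⟨b, by omega, hs, rfl⟩
    · rintro ⟨b, -, hs, rfl⟩
      exact ⟨⟨i, b, hs, rfl⟩, by simp [pvQuadOf]⟩

theorem innerB_eq_rowQuads (cs1 cs2 : List Char) (i : Nat) (hi : i < cs1.length) (fuel : Nat) :
    ∀ j : Nat,
    pvInnerB cs1 cs2 i cs1[i] fuel j = (pvRowQuads cs1 cs2 i fuel j).map (pvYieldB cs1 cs2) := by
  have hc : cs1[i]? = some cs1[i] := List.getElem?_eq_getElem hi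
  induction fuel with
  | zero => intro j; rw [pvInnerB, pvRowQuads, List.map_nil]
  | succ fuel ih =>
    intro j
    by_cases hj : j < cs2.length
    · by_cases hcnd : cs2[j]? = cs1[i]? ∧ (i = 0 ∨ j = 0 ∨ cs1[i - 1]? ≠ cs2[j - 1]?)
      · rw [pvRowQuads, if_pos hj, if_pos hcnd, pvInnerB, if_pos hj,
          if_pos (⟨by rw [hcnd.1, hc], hcnd.2⟩ :
            cs2[j]? = some cs1[i] ∧ (i = 0 ∨ j = 0 ∨ cs1[i - 1]? ≠ cs2[j - 1]?))]
        rw [List.map_cons, ih]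
        congr 1
      · rw [pvRowQuads, if_pos hj, if_neg hcnd, pvInnerB, if_pos hj,
          if_neg (fun hcon => hcnd ⟨by rw [hcon.1, hc], hcon.2⟩)]
        exact ih j.succ
    · rw [pvRowQuads, if_neg hj, pvInnerB, if_neg hj, List.map_nil]

theorem outerB_eq (cs1 cs2 : List Char) (fuel : Nat) :
    ∀ a : Nat, cs1.length ≤ a + fuel →
    pvOuterB cs1 cs2 fuel a =
      (PySem.List.pyRange (a : Int) (cs1.length : Int) 1).flatMap (fun row =>
        (PySem.Dict.getD (pvBuckets cs1 cs2) row []).map (pvYieldRow cs1 cs2 row)) := by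
  induction fuel with
  | zero =>
    intro a hf
    rw [pvOuterB, PySem.List.pyRange_one_eq_nil (by omega), List.flatMap_nil]
  | succ fuel ih =>
    intro a hf
    by_cases ha : a < cs1.length
    · rw [pvOuterB, dif_pos ha, PySem.List.pyRange_one_cons (by omega), List.flatMap_cons]
      congr 1
      · rw [bucket_eq, List.map_map, innerB_eq_rowQuads cs1 cs2 a ha cs2.length 0,
          ← filter_eq_rowQuads cs1 cs2 a ha]
        apply List.map_congr_left
        intro q hq
        have hfst : q.1 = a := by
          have := (List.mem_filter.mp hq).2
          simp at this
          omega
        simp only [Function.comp_apply, pvYieldRow, pvYieldB, hfst]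
      · have hcast : ((a : Int) + 1) = ((a + 1 : Nat) : Int) := by push_cast; ring
        rw [hcast, ih (a + 1) (by omega)]
    · rw [pvOuterB, dif_neg ha, PySem.List.pyRange_one_eq_nil (by omega), List.flatMap_nil]

-- ===== VERDICT (by name: the statement is the Claim_ definition above) =====
theorem divideBySubstrings_spec : Claim_equal_divideBySubstrings := by
  intro w1 w2 _
  unfold Spec_divideBySubstrings divideBySubstrings divideBySubstrings_alt
  rw [pvOuter_eq w1.toList w2.toList w1.toList.length 0 PySem.Set.empty
    (fun a b => by simp [pvM, PySem.Set.empty])]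
  simpa using outerB_eq w1.toList w2.toList w1.toList.length 0 (by omega)
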